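-- pv_equiv track=rewrite | github.com/Tecopython/TAF-exercito-brasileiro | confere_taf.py | mencao_final_limpa
-- ===== SOURCE A (Python) =====
-- def mencao_final_limpa(dicio): #menção final sem os militares com erros de lançamento
--     resultado = dict()         #mencao_final_limpa(lista_mencoes(aba))
--     for k, v in dicio.items():
--         if 'NR' in v:
--             resultado[k] = 'NR'
--             continue
--         if 'A' in v:
--             if 'I' in v:
--                 resultado[k] = 'I'
--                 continue
--             else:
--                 resultado[k] = 'R'
--                 continue
--         if 'I' in v:
--             resultado[k] = 'I'
--             continue
--         if 'R' in v:
--             resultado[k] = 'R'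
--             continue
--         if 'B' in v:
--             resultado[k] = 'B'
--             continue
--         if 'MB' in v:
--             resultado[k] = 'MB'
--             continue
--         if 'E' in v:
--             resultado[k] = 'E'
--             continue
--         if 'S' in v:
--             resultado[k] = 'S'
--     return resultado
-- ===== SOURCE B (Python) =====
-- PRIO = {'NR': 0, 'I': 1, 'A': 2, 'R': 2, 'B': 3, 'MB': 4, 'E': 5, 'S': 6}
-- LABEL = {0: 'NR', 1: 'I', 2: 'R', 3: 'B', 4: 'MB', 5: 'E', 6: 'S'}
--
-- def mencao_final_limpa(dicio):
--     resultado = {}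
--     for k, v in dicio.items():
--         best = None
--         for x in v:
--             p = PRIO.get(x)
--             if p is not None and (best is None or p < best):
--                 best = p
--         if best is not None:
--             resultado[k] = LABEL[best]
--     return resultado
-- ===== Notes on version B (the rewrite author's own statement) =====
-- stated objective: simpler
-- what changed: Replaced A's eight separate membership scans and nested NR/A-I if-chain per value list by a single left-to-right pass that keeps the minimum priority from a marker-to-priority table, then maps the minimal priority to its label.
import Mathlib
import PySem

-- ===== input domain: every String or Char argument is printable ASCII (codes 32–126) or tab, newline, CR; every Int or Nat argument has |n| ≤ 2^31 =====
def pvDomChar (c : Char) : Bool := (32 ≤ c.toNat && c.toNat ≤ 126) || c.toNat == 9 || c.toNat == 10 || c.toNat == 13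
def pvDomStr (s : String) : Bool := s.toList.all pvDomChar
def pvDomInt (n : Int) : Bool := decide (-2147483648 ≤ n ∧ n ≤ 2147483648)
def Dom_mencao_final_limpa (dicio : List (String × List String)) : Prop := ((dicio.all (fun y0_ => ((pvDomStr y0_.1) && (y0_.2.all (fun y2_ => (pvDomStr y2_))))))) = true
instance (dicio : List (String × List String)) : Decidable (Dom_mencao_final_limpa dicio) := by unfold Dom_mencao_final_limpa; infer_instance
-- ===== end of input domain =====

-- B replaces A's eight membership scans and nested if-chain by one pass over each value list
-- keeping the minimal priority from a marker→priority table (objective: simpler).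


-- ===== PORT A =====
-- body of A's loop: the nested membership if-chain
def pvStepA (res : PySem.Dict String String) (kv : String × List String) : PySem.Dict String String :=
  if "NR" ∈ kv.2 then res.insert kv.1 "NR"
  else if "A" ∈ kv.2 then
    (if "I" ∈ kv.2 then res.insert kv.1 "I" else res.insert kv.1 "R")
  else if "I" ∈ kv.2 then res.insert kv.1 "I"
  else if "R" ∈ kv.2 then res.insert kv.1 "R"
  else if "B" ∈ kv.2 then res.insert kv.1 "B"
  else if "MB" ∈ kv.2 then res.insert kv.1 "MB"
  else if "E" ∈ kv.2 then res.insert kv.1 "E"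
  else if "S" ∈ kv.2 then res.insert kv.1 "S"
  else res

def mencao_final_limpa (dicio : List (String × List String)) : List (String × String) :=
  ((PySem.Dict.ofList dicio).items.foldl pvStepA PySem.Dict.empty).items

-- ===== PORT B =====
def pvPRIO : PySem.Dict String Int :=
  PySem.Dict.ofList [("NR", 0), ("I", 1), ("A", 2), ("R", 2), ("B", 3), ("MB", 4), ("E", 5), ("S", 6)]

def pvLABEL : PySem.Dict Int String :=
  PySem.Dict.ofList [(0, "NR"), (1, "I"), (2, "R"), (3, "B"), (4, "MB"), (5, "E"), (6, "S")]

-- inner loop of B: keep the smallest priority seen so far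
def pvStepBest (b : Option Int) (x : String) : Option Int :=
  match pvPRIO.get? x with
  | none => b
  | some p =>
    match b with
    | none => some p
    | some q => if p < q then some p else b

def pvStepB (res : PySem.Dict String String) (kv : String × List String) : PySem.Dict String String :=
  match kv.2.foldl pvStepBest none with
  | none => res
  -- LABEL[best] : best is always one of pvLABEL's keys, so the KeyError branch (getD default) is unreachable
  | some p => res.insert kv.1 ((pvLABEL.get? p).getD "")

def mencao_final_limpa_alt (dicio : List (String × List String)) : List (String × String) :=
  ((PySem.Dict.ofList dicio).items.foldl pvStepB PySem.Dict.empty).items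

-- ===== PRECONDITION & SPEC =====
def Spec_mencao_final_limpa (dicio : List (String × List String)) (out : List (String × String)) : Prop := out = mencao_final_limpa_alt dicio
instance (dicio : List (String × List String)) (out : List (String × String)) : Decidable (Spec_mencao_final_limpa dicio out) := by unfold Spec_mencao_final_limpa; infer_instance

-- ===== CLAIM (what is proved, stated in full; the proofs are below) =====
def Claim_equal_mencao_final_limpa : Prop := ∀ (dicio : List (String × List String)), Dom_mencao_final_limpa dicio → Spec_mencao_final_limpa dicio (mencao_final_limpa dicio)

-- ===== LEMMAS AND PROOFS =====

-- combine two optional priorities by minimum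
def pvOmin (a b : Option Int) : Option Int :=
  match a, b with
  | none, b => b
  | some p, none => some p
  | some p, some q => some (min p q)

-- right-nested minimum of the priorities of the markers occurring in v
def pvChain : List String → Option Int
  | [] => none
  | x :: xs => pvOmin (pvPRIO.get? x) (pvChain xs)

lemma pvOmin_assoc (a b c : Option Int) : pvOmin (pvOmin a b) c = pvOmin a (pvOmin b c) := by
  cases a <;> cases b <;> cases c <;> simp [pvOmin, min_assoc]

lemma pvOmin_none_left (b : Option Int) : pvOmin none b = b := rfl

lemma pvStepBest_eq_omin (b : Option Int) (x : String) : pvStepBest b x = pvOmin b (pvPRIO.get? x) := by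
  cases h : pvPRIO.get? x with
  | none => cases b <;> simp [pvStepBest, pvOmin, h]
  | some p =>
    cases b with
    | none => simp [pvStepBest, pvOmin, h]
    | some q =>
      rcases lt_or_ge p q with hlt | hge
      · simp [pvStepBest, pvOmin, h, hlt, min_eq_right hlt.le]
      · simp [pvStepBest, pvOmin, h, not_lt.2 hge, min_eq_left hge]

lemma foldl_best_eq (v : List String) (acc : Option Int) :
    v.foldl pvStepBest acc = pvOmin acc (pvChain v) := by
  induction v generalizing acc with
  | nil => cases acc <;> rfl
  | cons x xs ih =>
    rw [List.foldl_cons, pvStepBest_eq_omin, ih]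
    show pvOmin (pvOmin acc (pvPRIO.get? x)) (pvChain xs) = pvOmin acc (pvChain (x :: xs))
    rw [pvOmin_assoc]
    rfl

-- the same minimum written as A's membership chain (priorities only)
def pvPchain (v : List String) : Option Int :=
  if "NR" ∈ v then some 0
  else if "I" ∈ v then some 1
  else if "A" ∈ v then some 2
  else if "R" ∈ v then some 2
  else if "B" ∈ v then some 3
  else if "MB" ∈ v then some 4
  else if "E" ∈ v then some 5
  else if "S" ∈ v then some 6
  else none

lemma prio_get (x : String) :
    pvPRIO.get? x =
      if x = "NR" then some 0 else if x = "I" then some 1 else if x = "A" then some 2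
      else if x = "R" then some 2 else if x = "B" then some 3 else if x = "MB" then some 4
      else if x = "E" then some 5 else if x = "S" then some 6 else none := by
  rcases eq_or_ne x "NR" with h0 | h0
  · subst h0; rfl
  rcases eq_or_ne x "I" with h1 | h1
  · subst h1; rfl
  rcases eq_or_ne x "A" with h2 | h2
  · subst h2; rfl
  rcases eq_or_ne x "R" with h3 | h3
  · subst h3; rfl
  rcases eq_or_ne x "B" with h4 | h4
  · subst h4; rfl
  rcases eq_or_ne x "MB" with h5 | h5
  · subst h5; rfl
  rcases eq_or_ne x "E" with h6 | h6
  · subst h6; rfl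
  rcases eq_or_ne x "S" with h7 | h7
  · subst h7; rfl
  simp [show pvPRIO = PySem.Dict.mk [("NR", 0), ("I", 1), ("A", 2), ("R", 2), ("B", 3), ("MB", 4), ("E", 5), ("S", 6)] from rfl,
    PySem.Dict.get?, List.find?, h0, h1, h2, h3, h4, h5, h6, h7,
    beq_eq_false_iff_ne.mpr (Ne.symm h0), beq_eq_false_iff_ne.mpr (Ne.symm h1),
    beq_eq_false_iff_ne.mpr (Ne.symm h2), beq_eq_false_iff_ne.mpr (Ne.symm h3),
    beq_eq_false_iff_ne.mpr (Ne.symm h4), beq_eq_false_iff_ne.mpr (Ne.symm h5),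
    beq_eq_false_iff_ne.mpr (Ne.symm h6), beq_eq_false_iff_ne.mpr (Ne.symm h7)]

set_option maxHeartbeats 1000000 in
lemma pvChain_eq_Pchain (v : List String) : pvChain v = pvPchain v := by
  induction v with
  | nil => rfl
  | cons x xs ih =>
    rcases eq_or_ne x "NR" with h0 | h0
    · subst h0
      simp only [pvChain, ih, prio_get, pvPchain, List.mem_cons]
      simp
      split_ifs <;> simp [pvOmin]
    rcases eq_or_ne x "I" with h1 | h1
    · subst h1
      simp only [pvChain, ih, prio_get, pvPchain, List.mem_cons]
      simp
      split_ifs <;> simp [pvOmin]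
    rcases eq_or_ne x "A" with h2 | h2
    · subst h2
      simp only [pvChain, ih, prio_get, pvPchain, List.mem_cons]
      simp
      split_ifs <;> simp [pvOmin]
    rcases eq_or_ne x "R" with h3 | h3
    · subst h3
      simp only [pvChain, ih, prio_get, pvPchain, List.mem_cons]
      simp
      split_ifs <;> simp [pvOmin]
    rcases eq_or_ne x "B" with h4 | h4
    · subst h4
      simp only [pvChain, ih, prio_get, pvPchain, List.mem_cons]
      simp
      split_ifs <;> simp [pvOmin]
    rcases eq_or_ne x "MB" with h5 | h5
    · subst h5
      simp only [pvChain, ih, prio_get, pvPchain, List.mem_cons]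
      simp
      split_ifs <;> simp [pvOmin]
    rcases eq_or_ne x "E" with h6 | h6
    · subst h6
      simp only [pvChain, ih, prio_get, pvPchain, List.mem_cons]
      simp
      split_ifs <;> simp [pvOmin]
    rcases eq_or_ne x "S" with h7 | h7
    · subst h7
      simp only [pvChain, ih, prio_get, pvPchain, List.mem_cons]
      simp
      split_ifs <;> simp [pvOmin]
    simp only [pvChain, ih, prio_get, pvPchain, List.mem_cons]
    simp [h0, h1, h2, h3, h4, h5, h6, h7, Ne.symm h0, Ne.symm h1, Ne.symm h2, Ne.symm h3,
      Ne.symm h4, Ne.symm h5, Ne.symm h6, Ne.symm h7, pvOmin_none_left]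

lemma step_eq (res : PySem.Dict String String) (kv : String × List String) :
    pvStepA res kv = pvStepB res kv := by
  unfold pvStepA pvStepB
  rw [foldl_best_eq, pvChain_eq_Pchain]
  unfold pvPchain
  split_ifs <;> rfl

-- ===== VERDICT (by name: the statement is the Claim_ definition above) =====
theorem mencao_final_limpa_spec : Claim_equal_mencao_final_limpa := by
  intro dicio _
  unfold Spec_mencao_final_limpa mencao_final_limpa mencao_final_limpa_alt
  congr 1
  apply List.foldl_ext
  intro d kv _
  exact step_eq d kv
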